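/- GENERATED by mk_final_copies.py from the proof of the farm's unit `include_in_sort` (farm:include_in_sort.1: Proof.lean) as the
   re-elaboration sweep compiled it — do not edit. -/
import Asan.CheckWalk
import Vorbis.Spec.Units.include_in_sort

open X86 X86.User Asan Vorbis

set_option maxRecDepth 4000
set_option maxHeartbeats 4000000

namespace Vorbis.Spec.include_in_sort

/-- The byte register `bpl` after `mov ebp, esi`, as a number: the low byte of rsi. This is the form in which the
walker states the two byte compares (`cmp bpl, 0xff` at 0x10481a, `cmp bpl, 0xa` at 0x104820). -/
theorem low_byte (x : Word) : (BitVec.setWidth 8 (Word.part Width.w32 x)).toNat = x.toNat % 256 := by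
  rw [BitVec.toNat_setWidth, Vorbis.toNat_part32]
  omega

/-- `includeInSort` of a sparse codebook (0x104832, C line 1198: `if (c->sparse) return TRUE`). -/
theorem value_sparse (sparse len : Nat) (h : ¬ sparse % 256 = 0) :
    includeInSort sparse len = Word.ofBV 1#32 := by
  unfold includeInSort
  have hne : sparse ≠ 0 := by omega
  rw [if_pos hne]
  rfl

/-- `includeInSort` of a dense codebook and the length `NO_CODE` (0x104839, C line 1199: `return FALSE`). -/
theorem value_nocode (sparse len : Nat) (hs : sparse < 256) (h : sparse % 256 = 0) (hlen : len = 255) :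
    includeInSort sparse len = Word.ofBV 0#32 := by
  unfold includeInSort
  have he : ¬ sparse ≠ 0 := by omega
  have hl : ¬ (len ≠ 255 ∧ 10 < len) := by omega
  rw [if_neg he, if_neg hl]
  rfl

/-- `includeInSort` of a dense codebook and a length above `STB_VORBIS_FAST_HUFFMAN_LENGTH` (0x104840, C line 1200:
`return TRUE`). -/
theorem value_long (sparse len : Nat) (hs : sparse < 256) (h : sparse % 256 = 0) (hne : ¬ len = 255)
    (hgt : 10 < len) : includeInSort sparse len = Word.ofBV 1#32 := by
  unfold includeInSort
  have he : ¬ sparse ≠ 0 := by omega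
  have hl : len ≠ 255 ∧ 10 < len := ⟨hne, hgt⟩
  rw [if_neg he, if_pos hl]
  rfl

/-- `includeInSort` of a dense codebook and a length of at most 10 (0x104826, C line 1201: `return FALSE`). -/
theorem value_short (sparse len : Nat) (hs : sparse < 256) (h : sparse % 256 = 0) (hle : len ≤ 10) :
    includeInSort sparse len = Word.ofBV 0#32 := by
  unfold includeInSort
  have he : ¬ sparse ≠ 0 := by omega
  have hl : ¬ (len ≠ 255 ∧ 10 < len) := by omega
  rw [if_neg he, if_neg hl]
  rfl

end Vorbis.Spec.include_in_sort

/-- `include_in_sort(c, len)` satisfies its contract: two pushes and `sub rsp, 8`, one check call (`load1` of `c->sparse`,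
offset 27 of `*c`), three compares, four paths that join at the common epilogue `add rsp, 8 ; pop rbx ; pop rbp ; ret`.
No loop, no store outside its own stack. -/
theorem Vorbis.Spec.Worked.include_in_sort_ok : Vorbis.Spec.include_in_sort.Statement := by
  intro Lay hLay μ hμ u₀ hcode hload1 others frames u ret he hpre
  v_entry he
  obtain ⟨hsh, hlive⟩ := hpre
  -- where `*c` is: one arithmetic fact (inside the data space, off the text, off this function's stack)
  have hsp := hsh.rsp
  have hwhere := hlive.where_ hsh.inv hsh.offText (by decide)
  simp only [Vorbis.Off.sizeof.Codebook] at hwhere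
  -- the byte `c->sparse` is a byte
  have hsparse : u.mem.readLE (u.reg .rdi + 27) 1 < 2 ^ 8 := Mem.readLE_lt _ _ _
  u_walk hcode [hμ.vendor] span [Vorbis.L.textLo, Vorbis.L.textHi] side (v_side)
  · -- 0x10480f, C line 1198: the check of the load of `c->sparse`: offset 27 lies inside `*c`; the three stack stores
    -- so far (two pushes, the return address of the check call) did not touch the shadow
    have hun : ShadowUntouched u.mem s_10480f.mem := by v_untouched
    refine hlive.accSmall hsh.inv hun _ 1 (by decide) (by u_omega) ?_
    simp only [Vorbis.Off.sizeof.Codebook]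
    u_omega
  · -- 0x104832, C line 1198: `c->sparse ≠ 0`, eax = 1
    refine ReachVia.done ?_
    v_returned
    refine ⟨by v_untouched, ?_⟩
    rw [w_rax]
    exact (Vorbis.Spec.include_in_sort.value_sparse _ _ hbr_104818).symm
  · -- 0x104839, C line 1199: dense, `len == NO_CODE`, eax = 0
    refine ReachVia.done ?_
    v_returned
    refine ⟨by v_untouched, ?_⟩
    rw [w_rax]
    rw [Vorbis.Spec.include_in_sort.low_byte] at hbr_10481e
    exact (Vorbis.Spec.include_in_sort.value_nocode _ _ hsparse hbr_104818 hbr_10481e).symm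
  · -- 0x104840, C line 1200: dense, `len ≠ NO_CODE`, `len > 10`, eax = 1
    refine ReachVia.done ?_
    v_returned
    refine ⟨by v_untouched, ?_⟩
    rw [w_rax]
    rw [Vorbis.Spec.include_in_sort.low_byte] at hbr_10481e hbr_104824
    exact (Vorbis.Spec.include_in_sort.value_long _ _ hsparse hbr_104818 hbr_10481e hbr_104824).symm
  · -- 0x104826, C line 1201: dense, `len ≤ 10`, eax = 0
    refine ReachVia.done ?_
    v_returned
    refine ⟨by v_untouched, ?_⟩
    rw [w_rax]
    rw [Vorbis.Spec.include_in_sort.low_byte] at hbr_104824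
    exact (Vorbis.Spec.include_in_sort.value_short _ _ hsparse hbr_104818 hbr_104824).symm
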